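-- pv_equiv track=rewrite | github.com/analogdevicesinc/pyadi-dt | adidt/xsa/builders/ad9081.py | _converter_select_rx
-- ===== SOURCE A (Python) =====
-- def _converter_select_rx(rx_m: int, rx_link_mode: int) -> str:
--     """Return the ``adi,converter-select`` phandle list for AD9081 RX."""
--     if rx_link_mode == 18 and rx_m == 4:
--         return (
--             "<&ad9081_rx_fddc_chan0 0>, <&ad9081_rx_fddc_chan0 1>, "
--             "<&ad9081_rx_fddc_chan1 0>, <&ad9081_rx_fddc_chan1 1>"
--         )
--     if rx_m >= 8:
--         return (
--             "<&ad9081_rx_fddc_chan0 0>, <&ad9081_rx_fddc_chan0 1>, "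
--             "<&ad9081_rx_fddc_chan1 0>, <&ad9081_rx_fddc_chan1 1>, "
--             "<&ad9081_rx_fddc_chan2 0>, <&ad9081_rx_fddc_chan2 1>, "
--             "<&ad9081_rx_fddc_chan3 0>, <&ad9081_rx_fddc_chan3 1>"
--         )
--     return ", ".join(
--         f"<&ad9081_rx_fddc_chan{i} 0>" for i in range(max(1, min(rx_m, 8)))
--     )
-- ===== SOURCE B (Python) =====
-- def _converter_select_rx(rx_m: int, rx_link_mode: int) -> str:
--     """Return the ``adi,converter-select`` phandle list for AD9081 RX."""
--     if rx_link_mode == 18 and rx_m == 4: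
--         channels, lanes = 2, 2
--     elif rx_m >= 8:
--         channels, lanes = 4, 2
--     else:
--         channels, lanes = max(1, min(rx_m, 8)), 1
--     return ", ".join(
--         f"<&ad9081_rx_fddc_chan{ch} {lane}>"
--         for ch in range(channels)
--         for lane in range(lanes)
--     )
-- ===== Notes on version B (the rewrite author's own statement) =====
-- stated objective: simpler
-- what changed: Replaces the two hard-coded literal strings plus a separate comprehension with one uniform table-driven build: pick (channels, lanes) per branch, then join a single nested comprehension over channels and lanes.
import Mathlib
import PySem

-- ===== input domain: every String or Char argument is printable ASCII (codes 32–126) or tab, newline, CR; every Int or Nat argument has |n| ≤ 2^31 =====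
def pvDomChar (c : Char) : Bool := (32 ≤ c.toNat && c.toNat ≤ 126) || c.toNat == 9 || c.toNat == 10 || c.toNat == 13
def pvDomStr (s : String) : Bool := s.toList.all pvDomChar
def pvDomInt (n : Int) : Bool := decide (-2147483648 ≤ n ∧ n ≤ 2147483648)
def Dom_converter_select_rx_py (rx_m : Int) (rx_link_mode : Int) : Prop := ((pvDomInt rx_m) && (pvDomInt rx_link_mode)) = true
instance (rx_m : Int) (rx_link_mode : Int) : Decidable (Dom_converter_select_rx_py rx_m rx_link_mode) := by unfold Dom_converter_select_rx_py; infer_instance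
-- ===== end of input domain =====

set_option maxRecDepth 10000


-- B replaces A's two hard-coded literals plus separate comprehension with one
-- table-driven (channels, lanes) build; objective: simpler/uniform, same cost.

-- ===== PORT A =====
def converter_select_rx_py (rx_m : Int) (rx_link_mode : Int) : String :=
  if rx_link_mode == 18 && rx_m == 4 then
    "<&ad9081_rx_fddc_chan0 0>, <&ad9081_rx_fddc_chan0 1>, " ++
    "<&ad9081_rx_fddc_chan1 0>, <&ad9081_rx_fddc_chan1 1>"
  else if rx_m ≥ 8 then
    "<&ad9081_rx_fddc_chan0 0>, <&ad9081_rx_fddc_chan0 1>, " ++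
    "<&ad9081_rx_fddc_chan1 0>, <&ad9081_rx_fddc_chan1 1>, " ++
    "<&ad9081_rx_fddc_chan2 0>, <&ad9081_rx_fddc_chan2 1>, " ++
    "<&ad9081_rx_fddc_chan3 0>, <&ad9081_rx_fddc_chan3 1>"
  else
    String.intercalate ", "
      ((PySem.List.pyRange 0 (max 1 (min rx_m 8)) 1).map
        (fun i => "<&ad9081_rx_fddc_chan" ++ PySem.Int.toStr i ++ " 0>"))

-- ===== PORT B =====
def converter_select_rx_py_alt (rx_m : Int) (rx_link_mode : Int) : String :=
  let p : Int × Int :=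
    if rx_link_mode == 18 && rx_m == 4 then (2, 2)
    else if rx_m ≥ 8 then (4, 2)
    else (max 1 (min rx_m 8), 1)
  String.intercalate ", "
    ((PySem.List.pyRange 0 p.1 1).flatMap (fun ch =>
      (PySem.List.pyRange 0 p.2 1).map (fun lane =>
        "<&ad9081_rx_fddc_chan" ++ PySem.Int.toStr ch ++ " " ++ PySem.Int.toStr lane ++ ">")))

-- ===== PRECONDITION & SPEC =====
def Spec_converter_select_rx_py (rx_m : Int) (rx_link_mode : Int) (out : String) : Prop := out = converter_select_rx_py_alt rx_m rx_link_mode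
instance (rx_m : Int) (rx_link_mode : Int) (out : String) : Decidable (Spec_converter_select_rx_py rx_m rx_link_mode out) := by unfold Spec_converter_select_rx_py; infer_instance

-- ===== CLAIM (what is proved, stated in full; the proofs are below) =====
def Claim_equal_converter_select_rx_py : Prop := ∀ (rx_m : Int) (rx_link_mode : Int), Dom_converter_select_rx_py rx_m rx_link_mode → Spec_converter_select_rx_py rx_m rx_link_mode (converter_select_rx_py rx_m rx_link_mode)

-- ===== LEMMAS AND PROOFS =====

-- In the default branch both sides join the same per-channel list: lanes = 1,
-- and the channel count max 1 (min rx_m 8) takes one of the eight values 1..8.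
theorem default_branch_eq (n : Int) (h1 : 1 ≤ n) (h8 : n ≤ 8) :
    String.intercalate ", "
      ((PySem.List.pyRange 0 n 1).map
        (fun i => "<&ad9081_rx_fddc_chan" ++ PySem.Int.toStr i ++ " 0>"))
    = String.intercalate ", "
      ((PySem.List.pyRange 0 n 1).flatMap (fun ch =>
        (PySem.List.pyRange 0 (1 : Int) 1).map (fun lane =>
          "<&ad9081_rx_fddc_chan" ++ PySem.Int.toStr ch ++ " " ++ PySem.Int.toStr lane ++ ">"))) := by
  have : n = 1 ∨ n = 2 ∨ n = 3 ∨ n = 4 ∨ n = 5 ∨ n = 6 ∨ n = 7 ∨ n = 8 := by omega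
  rcases this with h|h|h|h|h|h|h|h <;> subst h <;> decide

-- ===== VERDICT (by name: the statement is the Claim_ definition above) =====
theorem converter_select_rx_py_spec : Claim_equal_converter_select_rx_py := by
  intro rx_m rx_link_mode _
  unfold Spec_converter_select_rx_py converter_select_rx_py converter_select_rx_py_alt
  by_cases h1 : rx_link_mode == 18 && rx_m == 4
  · simp only [h1, if_pos]; decide
  · simp only [h1, if_neg, Bool.not_eq_true] at *
    by_cases h2 : rx_m ≥ 8
    · simp only [h2, if_pos]; decide
    · simp only [h2, if_neg, not_false_eq_true]
      exact default_branch_eq _ (by omega) (by simp at h2; omega)
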